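-- pv_equiv track=rewrite | github.com/Sort-Care/indexer | query_index.py | remove_after_big
-- ===== SOURCE A (Python) =====
-- def remove_after_big(arr):
--     res = []
--     igtag = False
--     for a in arr:
--         if igtag == False:
--             res.append(a)
--         else:
--             igtag = False
--             continue
--         if a >= 128 :
--             igtag = True
--     return res
-- ===== SOURCE B (Python) =====
-- def remove_after_big(arr):
--     # Find-and-slice: locate the next value >= 128 at or after position i,
--     # copy arr[i:j+1] as one slice, then resume at j+2 (skipping one element).
--     out = []
--     i = 0
--     n = len(arr)
--     while i < n:
--         j = next((k for k in range(i, n) if arr[k] >= 128), None)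
--         if j is None:
--             out += arr[i:]
--             return out
--         out += arr[i:j + 1]
--         i = j + 2
--     return out
-- ===== Notes on version B (the rewrite author's own statement) =====
-- stated objective: alternative
-- what changed: Replaces A's per-element boolean skip-flag state machine with a find-and-slice loop: repeatedly locate the next value >= 128 from index i, append the whole slice arr[i:j+1] at once, and resume at j+2 to drop the element after it.
import Mathlib
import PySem

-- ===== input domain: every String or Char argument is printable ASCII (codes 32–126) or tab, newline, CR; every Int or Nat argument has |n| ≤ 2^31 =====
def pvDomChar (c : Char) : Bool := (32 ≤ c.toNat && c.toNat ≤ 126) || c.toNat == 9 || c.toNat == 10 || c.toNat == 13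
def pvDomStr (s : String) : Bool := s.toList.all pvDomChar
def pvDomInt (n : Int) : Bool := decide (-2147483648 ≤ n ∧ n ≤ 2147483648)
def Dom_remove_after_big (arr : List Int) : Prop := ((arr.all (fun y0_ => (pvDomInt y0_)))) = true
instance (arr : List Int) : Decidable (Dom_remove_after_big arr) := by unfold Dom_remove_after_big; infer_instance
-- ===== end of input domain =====

-- B replaces A's per-element boolean skip-flag state machine by a find-and-slice
-- loop (locate next value ≥ 128, copy the prefix in one slice, skip one); same O(n) cost.

-- ===== PORT A =====
-- A: fold over arr with state (res, igtag); if the flag is clear append and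
-- maybe set it, otherwise clear the flag and continue.
def remove_after_big_step (st : List Int × Bool) (a : Int) : List Int × Bool :=
  if st.2 = false then
    let res := st.1 ++ [a]
    if a ≥ 128 then (res, true) else (res, false)
  else (st.1, false)

def remove_after_big (arr : List Int) : List Int :=
  (arr.foldl remove_after_big_step ([], false)).1

-- ===== PORT B =====
-- termination helper for the loop (cited by decreasing_by)
theorem pvFindIdx_lt_length {p : Int → Bool} {l : List Int} {j : Nat}
    (h : l.findIdx? p = some j) : j < l.length :=
  List.findIdx?_eq_some_iff_findIdx_eq.mp h |>.1

-- B: `next((k for k in range(i, n) if arr[k] >= 128), None)` is findIdx? on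
-- arr.drop i (absolute index j = i + j'); since i ≤ j < n, the slices
-- arr[i:j+1] and arr[i:] are exactly (arr.drop i).take (j'+1) and arr.drop i.
def remove_after_big_altLoop (arr : List Int) (out : List Int) (i : Nat) : List Int :=
  if i < arr.length then
    match h : (arr.drop i).findIdx? (fun v => decide (128 ≤ v)) with
    | none => out ++ arr.drop i
    | some j' => remove_after_big_altLoop arr (out ++ (arr.drop i).take (j' + 1)) (i + j' + 2)
  else out
termination_by arr.length - i
decreasing_by
  have := pvFindIdx_lt_length h
  simp only [List.length_drop] at this
  omega

def remove_after_big_alt (arr : List Int) : List Int :=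
  remove_after_big_altLoop arr [] 0

-- ===== PRECONDITION & SPEC =====
def Spec_remove_after_big (arr : List Int) (out : List Int) : Prop := out = remove_after_big_alt arr
instance (arr : List Int) (out : List Int) : Decidable (Spec_remove_after_big arr out) := by unfold Spec_remove_after_big; infer_instance

-- ===== CLAIM (what is proved, stated in full; the proofs are below) =====
def Claim_equal_remove_after_big : Prop := ∀ (arr : List Int), Dom_remove_after_big arr → Spec_remove_after_big arr (remove_after_big arr)

-- ===== LEMMAS AND PROOFS =====

-- Intermediate skip-next recursion both ports are reduced to.
def pvSkip : List Int → List Int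
  | [] => []
  | a :: rest => if a ≥ 128 then a :: pvSkip rest.tail else a :: pvSkip rest
termination_by l => l.length
decreasing_by
  · simp [List.length_tail]
  · simp

-- A's fold from a clear flag appends exactly pvSkip.
theorem remove_after_big_fold_inv (arr : List Int) :
    ∀ res : List Int,
      (arr.foldl remove_after_big_step (res, false)).1 = res ++ pvSkip arr := by
  induction arr using pvSkip.induct with
  | case1 => intro res; simp [pvSkip]
  | case2 a rest hbig ih =>
      intro res
      match rest, ih with
      | [], _ =>
          simp [pvSkip, remove_after_big_step, hbig]
      | b :: rs, ih =>
          have h := ih (res ++ [a])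
          simp only [List.foldl_cons, remove_after_big_step, hbig]
          simpa [pvSkip, hbig] using h
  | case3 a rest hbig ih =>
      intro res
      simp only [List.foldl_cons, remove_after_big_step, if_neg hbig]
      simpa [pvSkip, hbig] using ih (res ++ [a])

theorem pvSkip_of_no_big (l : List Int)
    (h : l.findIdx? (fun v => decide (128 ≤ v)) = none) : pvSkip l = l := by
  induction l with
  | nil => simp [pvSkip]
  | cons a rs ih =>
      rw [List.findIdx?_cons] at h
      by_cases hb : (128 : Int) ≤ a
      · simp [hb] at h
      · have : ¬ a ≥ 128 := hb
        simp only [hb, decide_false, Bool.false_eq_true, if_false] at h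
        simp only [Option.map_eq_none_iff] at h
        simp [pvSkip, this, ih h]

theorem pvSkip_split (l : List Int) :
    ∀ j : Nat, l.findIdx? (fun v => decide (128 ≤ v)) = some j →
      pvSkip l = l.take (j + 1) ++ pvSkip (l.drop (j + 2)) := by
  induction l with
  | nil => intro j h; simp at h
  | cons a rs ih =>
      intro j h
      rw [List.findIdx?_cons] at h
      by_cases hb : (128 : Int) ≤ a
      · simp only [hb, decide_true, if_true, Option.some.injEq] at h
        subst h
        simp [pvSkip, hb, List.drop_succ_cons, List.drop_one]
      · have hb' : ¬ a ≥ 128 := hb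
        simp only [hb, decide_false, Bool.false_eq_true, if_false] at h
        obtain ⟨j'', hj, heq⟩ := Option.map_eq_some_iff.mp h
        subst heq
        simp only [pvSkip, hb', if_false, List.take_succ_cons, List.drop_succ_cons]
        simp [ih j'' hj]

-- B's loop appends exactly pvSkip of the remaining suffix.
theorem remove_after_big_altLoop_eq (arr out : List Int) (i : Nat) :
    remove_after_big_altLoop arr out i = out ++ pvSkip (arr.drop i) := by
  induction out, i using remove_after_big_altLoop.induct (arr := arr) with
  | case1 out i hlt h =>
      rw [remove_after_big_altLoop, if_pos hlt, h]
      simp [pvSkip_of_no_big _ h]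
  | case2 out i hlt j' h ih =>
      rw [remove_after_big_altLoop, if_pos hlt, h]
      have hd : List.drop (i + j' + 2) arr = List.drop (j' + 2) (List.drop i arr) := by
        rw [List.drop_drop]; ring_nf
      simp only [ih, hd, pvSkip_split _ j' h, List.append_assoc]
  | case3 out i hge =>
      rw [remove_after_big_altLoop, if_neg hge]
      have : List.drop i arr = [] := List.drop_eq_nil_of_le (by omega)
      simp [this, pvSkip]

-- ===== VERDICT (by name: the statement is the Claim_ definition above) =====
theorem remove_after_big_spec : Claim_equal_remove_after_big := by
  intro arr _
  unfold Spec_remove_after_big remove_after_big remove_after_big_alt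
  rw [remove_after_big_altLoop_eq arr [] 0]
  rw [List.drop_zero]
  simpa using remove_after_big_fold_inv arr []
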